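-- pv_equiv track=rewrite | github.com/MAHMOUDRR707/Algorithms-and-Data-Structure | Unique Bid Auction.py | xx
-- ===== SOURCE A (Python) =====
-- def xx(x,z):
--     if x == 1 :
--         return 1
--     dic = {}
--     for i in range(x):
--         try:
--             dic[z[i]] += 1
--             dic[z[i]] = -1
--
--         except:
--             dic[z[i]] = i + 1
--     for i, j in sorted(dic.items()):
--         if j != -1:
--             return(j)
--
--             return (z.index(j)+1)
--     return -1
-- ===== SOURCE B (Python) =====
-- def xx(x, z):
--     # Single linear pass: record each bid's first 1-based position and which
--     # bids are duplicated, then take the minimum unique bid -- no sorting.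
--     if x == 1:
--         return 1
--     first = {}
--     dup = set()
--     for i in range(x):
--         v = z[i]
--         if v in first:
--             dup.add(v)
--         else:
--             first[v] = i + 1
--     cand = [(v, j) for v, j in first.items() if v not in dup]
--     return min(cand)[1] if cand else -1
-- ===== Notes on version B (the rewrite author's own statement) =====
-- stated objective: faster
-- what changed: Instead of building a count dict and sorting all its items to scan for the first unique bid, B makes one linear pass recording each bid's first position and a duplicate set, then takes the minimum unique bid directly without sorting.
import Mathlib
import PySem

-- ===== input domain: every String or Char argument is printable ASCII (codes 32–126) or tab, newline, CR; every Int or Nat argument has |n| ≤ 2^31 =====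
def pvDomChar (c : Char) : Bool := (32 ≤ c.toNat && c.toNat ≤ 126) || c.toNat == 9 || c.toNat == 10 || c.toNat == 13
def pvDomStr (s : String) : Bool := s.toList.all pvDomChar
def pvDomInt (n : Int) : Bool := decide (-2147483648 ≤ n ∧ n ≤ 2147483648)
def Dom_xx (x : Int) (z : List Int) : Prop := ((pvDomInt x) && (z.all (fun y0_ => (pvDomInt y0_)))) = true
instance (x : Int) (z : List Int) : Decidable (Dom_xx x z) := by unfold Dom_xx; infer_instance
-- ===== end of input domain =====

-- B is a single linear pass (first-position dict + duplicate set + running minimum) replacing A's sort of the dict items.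

-- ===== PORT A =====
-- the second for-loop: scan sorted items, return the first value j ≠ -1, else -1
def xxFind : List (Int × Int) → Int
  | [] => -1
  | e :: t => if e.2 ≠ -1 then e.2 else xxFind t

def xx (x : Int) (z : List Int) : Int :=
  if x == 1 then 1
  else
    let dic := (PySem.List.pyRange 0 x 1).foldl
      (fun (d : PySem.Dict Int Int) i =>
        let v := (PySem.List.pyGet? z i).getD 0   -- Pre_xx guarantees the index is in range
        match d.get? v with
        | some c => (d.insert v (c + 1)).insert v (-1)   -- try: dic[z[i]] += 1; dic[z[i]] = -1
        | none => d.insert v (i + 1))                    -- except: dic[z[i]] = i + 1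
      PySem.Dict.empty
    xxFind (PySem.List.sorted2 dic.items (fun e => e.1) (fun e => e.2))

-- ===== PORT B =====
def xx_alt (x : Int) (z : List Int) : Int :=
  if x == 1 then 1
  else
    let st := (PySem.List.pyRange 0 x 1).foldl
      (fun (st : PySem.Dict Int Int × PySem.Set Int) i =>
        let v := (PySem.List.pyGet? z i).getD 0   -- Pre_xx guarantees the index is in range
        if st.1.contains v then (st.1, PySem.Set.add st.2 v)
        else (st.1.insert v (i + 1), st.2))
      (PySem.Dict.empty, PySem.Set.empty)
    let cand := st.1.items.filter (fun e => !(PySem.Set.contains st.2 e.1))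
    match PySem.List.min2? cand (fun e => e.1) (fun e => e.2) with
    | some m => m.2
    | none => -1

-- ===== PRECONDITION & SPEC =====
-- Pre_xx excludes exactly the inputs where A raises IndexError: x ≥ 2 bids requested but fewer than x bids given.
def Pre_xx (x : Int) (z : List Int) : Prop := x = 1 ∨ x ≤ z.length
instance (x : Int) (z : List Int) : Decidable (Pre_xx x z) := by unfold Pre_xx; infer_instance
def pvWitness_xx : Int × List Int := (3, [5, 2, 2])

def Spec_xx (x : Int) (z : List Int) (out : Int) : Prop := out = xx_alt x z
instance (x : Int) (z : List Int) (out : Int) : Decidable (Spec_xx x z out) := by unfold Spec_xx; infer_instance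

-- ===== CLAIM (what is proved, stated in full; the proofs are below) =====
def Claim_equal_xx : Prop := ∀ (x : Int) (z : List Int), Dom_xx x z → Pre_xx x z → Spec_xx x z (xx x z)

-- ===== LEMMAS AND PROOFS =====

-- the adjustment A's dict applies to B's (first-position, duplicate-set) state
def pvAdj (s : PySem.Set Int) (e : Int × Int) : Int × Int :=
  (e.1, if PySem.Set.contains s e.1 then -1 else e.2)

def pvInv (d : PySem.Dict Int Int) (f : PySem.Dict Int Int) (s : PySem.Set Int) : Prop :=
  d.items = f.items.map (pvAdj s) ∧ (∀ e ∈ f.items, 1 ≤ e.2) ∧ (∀ v ∈ s, f.contains v = true)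

theorem pvLexLt (a b : Int × Int) :
    (decide (a.1 < b.1) || (!decide (b.1 < a.1) && decide (a.2 < b.2)))
      = decide ((toLex a : Lex (Int × Int)) < toLex b) := by
  rcases a with ⟨a1, a2⟩; rcases b with ⟨b1, b2⟩
  rw [Bool.eq_iff_iff]
  simp only [Bool.or_eq_true, Bool.and_eq_true, Bool.not_eq_true', decide_eq_true_eq,
    decide_eq_false_iff_not, Prod.Lex.lt_iff, ofLex_toLex]
  constructor
  · rintro (h | ⟨h1, h2⟩)
    · exact Or.inl h
    · rcases lt_or_ge a1 b1 with h' | h'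
      · exact Or.inl h'
      · exact Or.inr ⟨le_antisymm (not_lt.mp h1) h', h2⟩
  · rintro (h | ⟨h1, h2⟩)
    · exact Or.inl h
    · exact Or.inr ⟨by omega, h2⟩

theorem pvSorted2Eq (l : List (Int × Int)) :
    PySem.List.sorted2 l (fun e => e.1) (fun e => e.2)
      = PySem.List.sorted l (fun e => (toLex e : Lex (Int × Int))) := by
  rw [PySem.List.sorted_eq_foldl_insertBy]
  simp only [PySem.List.sorted2, if_neg (by decide : ¬ (false = true))]
  congr 1
  funext acc e
  congr 1
  funext a b
  rw [pvLexLt]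

theorem pvMin2Eq (l : List (Int × Int)) :
    PySem.List.min2? l (fun e => e.1) (fun e => e.2)
      = PySem.List.min? l (fun e => (toLex e : Lex (Int × Int))) := by
  simp only [PySem.List.min2?, PySem.List.min?]
  congr 1
  funext acc e
  cases acc with
  | none => rfl
  | some m =>
    simp only [pvLexLt, decide_eq_true_eq]

theorem pvFindEq (l : List (Int × Int)) :
    xxFind l = (match (l.filter (fun e => decide (e.2 ≠ -1))).head? with
                | some e => e.2
                | none => -1) := by
  induction l with
  | nil => rfl
  | cons e t ih =>
    by_cases h : e.2 ≠ -1
    · simp [xxFind, h]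
    · simp [xxFind, h, ih]

-- one step of the two loops preserves pvInv
theorem pvStep (z : List Int) (i : Int) (hi : 0 ≤ i)
    (d f : PySem.Dict Int Int) (s : PySem.Set Int) (hinv : pvInv d f s) :
    pvInv
      (let v := (PySem.List.pyGet? z i).getD 0
       match d.get? v with
       | some c => (d.insert v (c + 1)).insert v (-1)
       | none => d.insert v (i + 1))
      (let v := (PySem.List.pyGet? z i).getD 0
       if f.contains v then f else f.insert v (i + 1))
      (let v := (PySem.List.pyGet? z i).getD 0
       if f.contains v then PySem.Set.add s v else s) := by
  obtain ⟨hd, hge, hsub⟩ := hinv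
  set v := (PySem.List.pyGet? z i).getD 0 with hv
  have hkeys : d.keys = f.keys := by
    simp only [PySem.Dict.keys, hd, List.map_map]; rfl
  have hcont : d.contains v = f.contains v := by
    rw [Bool.eq_iff_iff, PySem.Dict.contains_iff_mem_keys, PySem.Dict.contains_iff_mem_keys, hkeys]
  by_cases hfc : f.contains v = true
  · -- key already present: A overwrites with -1, B records a duplicate
    have hsome : (d.get? v).isSome := by
      rw [← PySem.Dict.contains_eq_isSome_get?, hcont, hfc]
    obtain ⟨c, hc⟩ := Option.isSome_iff_exists.mp hsome
    simp only [hc, hfc, if_pos]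
    rw [PySem.Dict.insert_insert_self]
    refine ⟨?_, hge, ?_⟩
    · rw [PySem.Dict.items_insert_of_contains d (-1) (hcont.trans hfc), hd, List.map_map]
      refine List.map_congr_left ?_
      intro e he
      by_cases hev : e.1 = v
      · simp [pvAdj, hev]
      · simp [pvAdj, hev]
    · intro w hw
      rcases (PySem.Set.mem_add s v w).mp hw with h | h
      · exact hsub w h
      · rw [h]; exact hfc
  · -- new key: both append (v, i+1)
    have hnone : d.get? v = none := by
      rw [PySem.Dict.get?_eq_none_iff_contains, hcont, Bool.eq_false_iff]; exact hfc
    have hsv : PySem.Set.contains s v = false := by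
      rw [Bool.eq_false_iff]
      intro h
      exact hfc (hsub v (PySem.Set.contains_iff s v |>.mp h))
    simp only [hnone, hfc, Bool.false_eq_true, if_false]
    refine ⟨?_, ?_, ?_⟩
    · rw [PySem.Dict.items_insert_of_not_contains d _ (hcont.trans (Bool.eq_false_iff.mpr hfc)),
        PySem.Dict.items_insert_of_not_contains f _ (Bool.eq_false_iff.mpr hfc), hd, List.map_append]
      simp [pvAdj]
      intro h
      exact absurd (hsub v h) hfc
    · intro e he
      rw [PySem.Dict.items_insert_of_not_contains f _ (Bool.eq_false_iff.mpr hfc)] at he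
      rcases List.mem_append.mp he with h | h
      · exact hge e h
      · simp at h; subst h; simpa using by omega
    · intro w hw
      rw [PySem.Dict.contains_insert]
      rw [hsub w hw, Bool.or_true]

-- the two loops preserve pvInv
theorem pvLoop (z : List Int) (l : List Int)
    (d f : PySem.Dict Int Int) (s : PySem.Set Int)
    (h0 : ∀ i ∈ l, 0 ≤ i) (hinv : pvInv d f s) :
    pvInv
      (l.foldl (fun (d : PySem.Dict Int Int) i =>
        let v := (PySem.List.pyGet? z i).getD 0
        match d.get? v with
        | some c => (d.insert v (c + 1)).insert v (-1)
        | none => d.insert v (i + 1)) d)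
      (l.foldl (fun (st : PySem.Dict Int Int × PySem.Set Int) i =>
        let v := (PySem.List.pyGet? z i).getD 0
        if st.1.contains v then (st.1, PySem.Set.add st.2 v)
        else (st.1.insert v (i + 1), st.2)) (f, s)).1
      (l.foldl (fun (st : PySem.Dict Int Int × PySem.Set Int) i =>
        let v := (PySem.List.pyGet? z i).getD 0
        if st.1.contains v then (st.1, PySem.Set.add st.2 v)
        else (st.1.insert v (i + 1), st.2)) (f, s)).2 := by
  induction l generalizing d f s with
  | nil => exact hinv
  | cons i t ih =>
    simp only [List.foldl_cons]
    have hstep := pvStep z i (h0 i (List.mem_cons_self)) d f s hinv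
    by_cases hfc : f.contains ((PySem.List.pyGet? z i).getD 0) = true
    · simp only [hfc, if_pos] at hstep ⊢
      exact ih _ _ _ (fun j hj => h0 j (List.mem_cons_of_mem _ hj)) hstep
    · simp only [hfc, Bool.false_eq_true, if_false] at hstep ⊢
      exact ih _ _ _ (fun j hj => h0 j (List.mem_cons_of_mem _ hj)) hstep

-- the two final passes agree given pvInv
theorem pvFinal (d f : PySem.Dict Int Int) (s : PySem.Set Int) (hinv : pvInv d f s) :
    xxFind (PySem.List.sorted2 d.items (fun e => e.1) (fun e => e.2))
      = (match PySem.List.min2? (f.items.filter (fun e => !(PySem.Set.contains s e.1)))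
               (fun e => e.1) (fun e => e.2) with
         | some m => m.2
         | none => -1) := by
  obtain ⟨hd, hge, hsub⟩ := hinv
  rw [pvSorted2Eq, pvMin2Eq, pvFindEq]
  have hgen : ∀ (L : List (Int × Int)), (∀ e ∈ L, 1 ≤ e.2) →
      (L.map (pvAdj s)).filter (fun e => decide (e.2 ≠ -1))
        = L.filter (fun e => !(PySem.Set.contains s e.1)) := by
    intro L hge
    induction L with
    | nil => rfl
    | cons e t ih =>
      have hge' : ∀ e' ∈ t, 1 ≤ e'.2 := fun e' h => hge e' (List.mem_cons_of_mem _ h)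
      have h1 : 1 ≤ e.2 := hge e List.mem_cons_self
      simp only [List.map_cons, List.filter_cons]
      by_cases hc : PySem.Set.contains s e.1 = true
      · simp only [pvAdj, hc, if_pos]
        simpa using ih hge'
      · simp only [pvAdj, hc, Bool.false_eq_true, if_false]
        have : e.2 ≠ -1 := by omega
        rw [if_pos (by simpa using this), ih hge']
        simp
  have hfilter : d.items.filter (fun e => decide (e.2 ≠ -1))
      = f.items.filter (fun e => !(PySem.Set.contains s e.1)) := by
    rw [hd]; exact hgen f.items hge
  have hperm : (PySem.List.sorted d.items (fun e => (toLex e : Lex (Int × Int)))).filter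
        (fun e => decide (e.2 ≠ -1))
      |>.Perm (f.items.filter (fun e => !(PySem.Set.contains s e.1))) := by
    rw [← hfilter]
    exact (PySem.List.sorted_perm d.items _ false).filter _
  have hpw : ((PySem.List.sorted d.items (fun e => (toLex e : Lex (Int × Int)))).filter
        (fun e => decide (e.2 ≠ -1))).Pairwise
        (fun a b => (toLex a : Lex (Int × Int)) ≤ toLex b) :=
    (PySem.List.sorted_pairwise d.items _).filter _
  cases hF : (PySem.List.sorted d.items (fun e => (toLex e : Lex (Int × Int)))).filter
      (fun e => decide (e.2 ≠ -1)) with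
  | nil =>
    have hC : f.items.filter (fun e => !(PySem.Set.contains s e.1)) = [] := by
      have := hF ▸ hperm
      exact this.symm.eq_nil
    rw [hC]
    rfl
  | cons h t =>
    rw [hF] at hperm hpw
    have hCne : f.items.filter (fun e => !(PySem.Set.contains s e.1)) ≠ [] := by
      intro hnil
      rw [hnil] at hperm
      exact (List.cons_ne_nil h t) hperm.eq_nil
    cases hmin : PySem.List.min? (f.items.filter (fun e => !(PySem.Set.contains s e.1)))
        (fun e => (toLex e : Lex (Int × Int))) with
    | none => exact absurd ((PySem.List.min?_eq_none_iff _ _).mp hmin) hCne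
    | some m =>
      have hmF : m ∈ h :: t := hperm.symm.subset (PySem.List.min?_mem hmin)
      have hhm : (toLex h : Lex (Int × Int)) ≤ toLex m := by
        rcases List.mem_cons.mp hmF with h' | h'
        · rw [h']
        · exact (List.pairwise_cons.mp hpw).1 m h'
      have hmh : (toLex m : Lex (Int × Int)) ≤ toLex h :=
        PySem.List.min?_isMin hmin h (hperm.subset (List.mem_cons_self))
      have : h = m := toLex.injective (le_antisymm hhm hmh)
      simp [this]

-- ===== VERDICT (by name: the statement is the Claim_ definition above) =====
theorem xx_spec : Claim_equal_xx := by
  intro x z _ _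
  unfold Spec_xx xx xx_alt
  by_cases hx : x == 1
  · simp [hx]
  · simp only [hx, Bool.false_eq_true, if_false]
    have hinv0 : pvInv PySem.Dict.empty PySem.Dict.empty PySem.Set.empty := by
      refine ⟨rfl, ?_, ?_⟩ <;> intro e he <;> simp [PySem.Dict.empty, PySem.Set.empty] at he
    have h0 : ∀ i ∈ PySem.List.pyRange 0 x 1, 0 ≤ i := by
      intro i hi; exact (PySem.List.mem_pyRange_one.mp hi).1
    exact pvFinal _ _ _ (pvLoop z _ _ _ _ h0 hinv0)
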